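-- pv_equiv track=rewrite | github.com/di-uni/problem-solving | baekjoon/math/O_2775_부녀회장이 될테야.py | sum_peole
-- ===== SOURCE A (Python) =====
-- sum_dict = {}
--
-- def sum_peole(k, n):
--     if k == 0:
--         return n
--     if n == 0:
--         return 0
--     if (k, n) not in sum_dict:
--         sum_dict[(k, n)] = sum_peole(k - 1, n) + sum_peole(k, n - 1)
--     return sum_dict[(k, n)]
-- ===== SOURCE B (Python) =====
-- def sum_peole(k, n):
--     if k == 0:
--         return n
--     if n == 0:
--         return 0
--     # closed form: C(n+k, k+1), computed as an exact iterative product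
--     num = 1
--     for i in range(1, k + 2):
--         num = num * (n - 1 + i) // i
--     return num
-- ===== Notes on version B (the rewrite author's own statement) =====
-- stated objective: faster
-- what changed: Replaces A's memoized two-variable Pascal recurrence (a (k x n) table of subproblems) by the closed-form binomial coefficient C(n+k, k+1), computed in a single exact multiplicative loop of k+1 steps.
import Mathlib
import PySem

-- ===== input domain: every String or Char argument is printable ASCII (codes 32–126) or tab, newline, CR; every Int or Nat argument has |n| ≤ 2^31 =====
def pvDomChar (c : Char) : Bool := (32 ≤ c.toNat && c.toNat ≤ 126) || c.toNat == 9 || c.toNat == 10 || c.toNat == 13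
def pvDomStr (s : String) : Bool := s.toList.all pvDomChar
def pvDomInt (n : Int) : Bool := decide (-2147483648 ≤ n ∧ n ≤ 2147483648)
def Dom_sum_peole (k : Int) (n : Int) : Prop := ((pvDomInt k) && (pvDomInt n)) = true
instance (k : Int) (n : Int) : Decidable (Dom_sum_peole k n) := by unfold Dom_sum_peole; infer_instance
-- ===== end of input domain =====

-- B replaces A's memoized Pascal-recurrence recursion by the closed form C(n+k, k+1),
-- computed as a single exact multiplicative pass (faster: O(k) multiplications vs A's O(k*n) additions).

-- ===== PORT A =====
-- A's recursion with its memo dict 'sum_dict' threaded through as state (a fresh dict per top-level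
-- call: the global only caches values, it never changes any result); the recursion is fuelled:
-- inside Pre_ the depth is at most k+n, so the fuel is never exhausted.
def sum_peoleGo : Nat → Int → Int → Std.HashMap (Int × Int) Int → Int × Std.HashMap (Int × Int) Int
  | 0, _, _, d => (0, d)
  | fuel + 1, k, n, d =>
    if k = 0 then (n, d)
    else if n = 0 then (0, d)
    else match d[(k, n)]? with
      | some v => (v, d)
      | none =>
        let r1 := sum_peoleGo fuel (k - 1) n d
        let r2 := sum_peoleGo fuel k (n - 1) r1.2
        (r1.1 + r2.1, r2.2.insert (k, n) (r1.1 + r2.1))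

def sum_peole (k : Int) (n : Int) : Int :=
  (sum_peoleGo (k.toNat + n.toNat + 1) k n Std.HashMap.emptyWithCapacity).1

-- ===== PORT B =====
def sum_peole_alt (k : Int) (n : Int) : Int :=
  if k = 0 then n
  else if n = 0 then 0
  else (PySem.List.pyRange 1 (k + 2) 1).foldl
    (fun num i => PySem.Int.floordiv (num * (n - 1 + i)) i) 1

-- ===== PRECONDITION & SPEC =====
-- Pre_ excludes exactly the mixed-sign inputs (k ≥ 1 with n < 0, or k < 0 with n ≠ 0) on which
-- Python A recurses without reaching a base case and raises RecursionError.
def Pre_sum_peole (k : Int) (n : Int) : Prop :=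
  k = 0 ∨ n = 0 ∨ (1 ≤ k ∧ 1 ≤ n)
instance (k : Int) (n : Int) : Decidable (Pre_sum_peole k n) := by
  unfold Pre_sum_peole; infer_instance

def pvWitness_sum_peole : Int × Int := (3, 4)

def Spec_sum_peole (k : Int) (n : Int) (out : Int) : Prop := out = sum_peole_alt k n
instance (k : Int) (n : Int) (out : Int) : Decidable (Spec_sum_peole k n out) := by
  unfold Spec_sum_peole; infer_instance

-- ===== CLAIM (what is proved, stated in full; the proofs are below) =====
def Claim_equal_sum_peole : Prop :=
  ∀ (k : Int) (n : Int), Dom_sum_peole k n → Pre_sum_peole k n →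
    Spec_sum_peole k n (sum_peole k n)

-- ===== LEMMAS AND PROOFS =====

-- the mathematical value both programs compute on nonnegative inputs
def chooseInt (k : Int) (n : Int) : Int := ((n.toNat + k.toNat).choose (k.toNat + 1) : Int)

-- every entry of the threaded memo dict is a correct binomial value at a positive key
def MemoOK (d : Std.HashMap (Int × Int) Int) : Prop :=
  ∀ (p : Int × Int) (v : Int), d[p]? = some v → 1 ≤ p.1 ∧ 1 ≤ p.2 ∧ v = chooseInt p.1 p.2

theorem pascal_chooseInt (k n : Int) (hk : 1 ≤ k) (hn : 1 ≤ n) :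
    chooseInt (k - 1) n + chooseInt k (n - 1) = chooseInt k n := by
  obtain ⟨K', hK⟩ : ∃ K' : Nat, k = (K' : Int) + 1 := ⟨(k - 1).toNat, by omega⟩
  obtain ⟨N', hN⟩ : ∃ N' : Nat, n = (N' : Int) + 1 := ⟨(n - 1).toNat, by omega⟩
  subst hK; subst hN
  have e1 : ((K' : Int) + 1 - 1).toNat = K' := by omega
  have e2 : ((N' : Int) + 1 - 1).toNat = N' := by omega
  have e3 : ((K' : Int) + 1).toNat = K' + 1 := by omega
  have e4 : ((N' : Int) + 1).toNat = N' + 1 := by omega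
  unfold chooseInt
  rw [e1, e2, e3, e4]
  have ha : N' + 1 + (K' + 1) = N' + K' + 1 + 1 := by omega
  have hb : N' + 1 + K' = N' + K' + 1 := by omega
  have hc : N' + (K' + 1) = N' + K' + 1 := by omega
  rw [ha, hb, hc, Nat.choose_succ_succ (N' + K' + 1) (K' + 1)]
  push_cast; ring

-- A's memoized recursion computes chooseInt and keeps the memo correct
theorem sum_peoleGo_eq_choose (fuel : Nat) :
    ∀ (k n : Int) (d : Std.HashMap (Int × Int) Int), 0 ≤ k → 0 ≤ n →
      k.toNat + n.toNat < fuel → MemoOK d →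
      (sum_peoleGo fuel k n d).1 = chooseInt k n ∧ MemoOK (sum_peoleGo fuel k n d).2 := by
  induction fuel with
  | zero => intro k n d hk hn h _; omega
  | succ fuel ih =>
    intro k n d hk hn h hinv
    by_cases hk0 : k = 0
    · subst hk0
      refine ⟨?_, by simpa [sum_peoleGo] using hinv⟩
      simp [sum_peoleGo, chooseInt, Nat.choose_one_right]
      omega
    · by_cases hn0 : n = 0
      · subst hn0
        refine ⟨?_, by simpa [sum_peoleGo, hk0] using hinv⟩
        simp [sum_peoleGo, hk0, chooseInt]
      · have hk1 : 1 ≤ k := by omega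
        have hn1 : 1 ≤ n := by omega
        rw [sum_peoleGo, if_neg hk0, if_neg hn0]
        cases hget : d[(k, n)]? with
        | some v =>
          exact ⟨(hinv (k, n) v hget).2.2, by simpa [hget] using hinv⟩
        | none =>
          have h1 := ih (k - 1) n d (by omega) hn (by omega) hinv
          have h2 := ih k (n - 1) (sum_peoleGo fuel (k - 1) n d).2 hk (by omega)
            (by omega) h1.2
          refine ⟨?_, ?_⟩
          · simpa [h1.1, h2.1] using pascal_chooseInt k n hk1 hn1
          · intro p v hv
            rw [Std.HashMap.getElem?_insert] at hv
            by_cases hp : p = (k, n)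
            · subst hp
              rw [if_pos (by simp)] at hv
              refine ⟨hk1, hn1, ?_⟩
              have := Option.some.inj hv
              rw [← this, h1.1, h2.1]
              exact pascal_chooseInt k n hk1 hn1
            · have hne : ¬ (((k, n) == p) = true) := by
                simp only [beq_iff_eq]
                exact fun h => hp h.symm
              rw [if_neg hne] at hv
              exact h2.2 p v hv

-- B's product loop: after m factors the accumulator is C(N-1+m, m) (exact division throughout).
theorem foldB_eq_choose (N : Nat) (hN : 1 ≤ N) :
    ∀ (m : Nat),
      (PySem.List.pyRange 1 ((m : Int) + 1) 1).foldl
        (fun num i => PySem.Int.floordiv (num * ((N : Int) - 1 + i)) i) 1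
      = ((N - 1 + m).choose m : Int) := by
  intro m
  induction m with
  | zero =>
    rw [PySem.List.pyRange_one_eq_nil (by norm_num)]
    simp
  | succ m ih =>
    have hsplit : PySem.List.pyRange 1 ((↑(m + 1) : Int) + 1) 1
        = PySem.List.pyRange 1 ((m : Int) + 1) 1 ++ [(m : Int) + 1] := by
      have := PySem.List.pyRange_one_succ_right (a := 1) (b := (m : Int) + 1)
        (by omega)
      push_cast at this
      exact this
    rw [hsplit, List.foldl_append, ih]
    simp only [List.foldl_cons, List.foldl_nil]
    -- the next factor: C(N-1+m, m) * (N + m) = (m+1) * C(N+m, m+1), then exact floordiv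
    have key : ((N - 1 + m).choose m : Int) * ((N : Int) - 1 + ((m : Int) + 1))
        = ((m : Int) + 1) * ((N - 1 + (m + 1)).choose (m + 1) : Int) := by
      have hnat := Nat.add_one_mul_choose_eq (N - 1 + m) m
      have h1 : (N : Int) - 1 + ((m : Int) + 1) = ((N - 1 + m + 1 : Nat) : Int) := by
        push_cast [Nat.cast_sub hN]; ring
      have h2 : N - 1 + (m + 1) = N - 1 + m + 1 := by omega
      rw [h1, h2]
      exact_mod_cast by
        calc (N - 1 + m).choose m * (N - 1 + m + 1)
            = (N - 1 + m).succ * (N - 1 + m).choose m := by ring_nf; rw [Nat.succ_eq_add_one]; ring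
          _ = (N - 1 + m + 1).choose (m + 1) * (m + 1) := by
              simpa [Nat.succ_eq_add_one] using hnat
          _ = (m + 1) * (N - 1 + m + 1).choose (m + 1) := by ring
    rw [key, PySem.Int.floordiv_eq_ediv_of_pos (by positivity),
      Int.mul_ediv_cancel_left _ (by positivity)]

-- ===== VERDICT (by name: the statement is the Claim_ definition above) =====
theorem sum_peole_spec : Claim_equal_sum_peole := by
  intro k n _ hpre
  unfold Spec_sum_peole sum_peole sum_peole_alt
  by_cases hk : k = 0
  · subst hk; simp [sum_peoleGo]
  · by_cases hn : n = 0
    · subst hn; simp [sum_peoleGo, hk]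
    · rcases hpre with h | h | ⟨hk1, hn1⟩
      · exact absurd h hk
      · exact absurd h hn
      · rw [if_neg hk, if_neg hn]
        have hempty : MemoOK Std.HashMap.emptyWithCapacity := by
          intro p v hv; simp at hv
        have hA := (sum_peoleGo_eq_choose (k.toNat + n.toNat + 1) k n Std.HashMap.emptyWithCapacity
          (by omega) (by omega) (by omega) hempty).1
        rw [hA]
        set K := k.toNat with hK
        set N := n.toNat with hN
        have hnN : n = (N : Int) := by omega
        have hNN1 : 1 ≤ N := by omega
        have hB := foldB_eq_choose N hNN1 (K + 1)
        have hb2 : (k + 2) = ((K + 1 : Nat) : Int) + 1 := by omega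
        rw [hnN, hb2, hB]
        unfold chooseInt
        have hidx : N - 1 + (K + 1) = (((N : Int)).toNat + K) := by omega
        rw [hidx]
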